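-- pv_equiv track=rewrite | github.com/xcodz/decoding-the-book-of-soyga | soyga_version2_research_scripts_and_outputs/soyga_phase7_deep_dive/script1_ordinal_mirror.py | positions_for_target
-- ===== SOURCE A (Python) =====
-- import re, itertools
--
-- def positions_for_target(source, target, cap=20000):
--     pos_lists=[]
--     for ch in target:
--         pos=[i+1 for i,c in enumerate(source) if c==ch]
--         if not pos: return []
--         pos_lists.append(pos)
--     seqs=[]
--     for combo in itertools.product(*pos_lists):
--         seqs.append(combo)
--         if len(seqs)>=cap: break
--     return seqs
-- ===== SOURCE B (Python) =====
-- def positions_for_target(source, target, cap=20000):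
--     pos_lists = []
--     for ch in target:
--         pos = [i + 1 for i, c in enumerate(source) if c == ch]
--         if not pos:
--             return []
--         pos_lists.append(pos)
--     total = 1
--     for pos in pos_lists:
--         total *= len(pos)
--     # Enumerate combinations directly: combination k is the mixed-radix
--     # decoding of k over the position lists (last list varies fastest).
--     out = []
--     k = 0
--     while True:
--         combo = []
--         j = k
--         for pos in reversed(pos_lists):
--             j, r = divmod(j, len(pos))
--             combo.append(pos[r])
--         combo.reverse()
--         out.append(tuple(combo))
--         k += 1
--         if k >= total or len(out) >= cap:
--             break
--     return out
-- ===== Notes on version B (the rewrite author's own statement) =====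
-- stated objective: alternative
-- what changed: replaces the itertools.product generator with break-at-cap by computing N = product of the position-list lengths and a do-while emit loop that decodes each combination index k into its tuple by mixed-radix divmod arithmetic over the position lists (last list varying fastest)
import Mathlib
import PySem

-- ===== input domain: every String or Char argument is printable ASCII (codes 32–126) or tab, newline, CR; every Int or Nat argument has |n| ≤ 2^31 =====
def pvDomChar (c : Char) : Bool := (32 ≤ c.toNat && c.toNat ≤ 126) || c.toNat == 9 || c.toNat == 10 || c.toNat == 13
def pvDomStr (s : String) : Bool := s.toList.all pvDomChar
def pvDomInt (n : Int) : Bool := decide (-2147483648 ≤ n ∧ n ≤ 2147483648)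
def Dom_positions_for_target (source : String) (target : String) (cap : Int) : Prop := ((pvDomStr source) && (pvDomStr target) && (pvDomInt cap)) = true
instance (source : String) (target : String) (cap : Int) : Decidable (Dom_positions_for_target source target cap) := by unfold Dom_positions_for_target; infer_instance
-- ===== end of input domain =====

-- B replaces A's itertools.product enumeration by a do-while loop that decodes each
-- combination index k by mixed-radix arithmetic: alternative algorithm, same cost.

-- ===== shared helper (both Pythons build the per-character position lists with the same loop) =====
-- pos = [i+1 for i,c in enumerate(source) if c==ch]
def pvPos (source : List Char) (ch : Char) : List Int :=
  ((PySem.List.enumerate source).filter (fun p => p.2 == ch)).map (fun p => p.1 + 1)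

-- the 'for ch in target' loop with early 'return []' when a character is missing (none = that early return)
def pvPosLists (source : List Char) : List Char → Option (List (List Int))
  | [] => some []
  | ch :: rest =>
    let pos := pvPos source ch
    if pos = [] then none
    else (pvPosLists source rest).map (fun tl => pos :: tl)

-- ===== PORT A =====
-- itertools.product(*pos_lists) in product order (last list varies fastest)
def pvProdA : List (List Int) → List (List Int)
  | [] => [[]]
  | l :: rest => l.flatMap (fun x => (pvProdA rest).map (fun t => x :: t))

-- 'for combo in product: seqs.append(combo); if len(seqs) >= cap: break'
def pvLoopA (cap : Int) : List (List Int) → List (List Int) → List (List Int)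
  | [], seqs => seqs
  | c :: rest, seqs =>
    let s := seqs ++ [c]
    if cap ≤ (s.length : Int) then s else pvLoopA cap rest s

def positions_for_target (source : String) (target : String) (cap : Int) : List (List Int) :=
  match pvPosLists source.toList target.toList with
  | none => []
  | some pls => pvLoopA cap (pvProdA pls) []

-- ===== PORT B =====
-- total = 1; for pos in pos_lists: total *= len(pos)
def pvTotal (pls : List (List Int)) : Int :=
  pls.foldl (fun t pos => t * (pos.length : Int)) 1

-- B's inner loop: 'for pos in reversed(pos_lists): j, r = divmod(j, len(pos)); combo.append(pos[r])'
-- pos ≠ [] and j ≥ 0, so pos[r] is in range and Python never raises here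
def pvDecodeB : List (List Int) → Int → List Int
  | [], _ => []
  | pos :: rest, j =>
    PySem.List.pyGetD pos (PySem.Int.mod j (pos.length : Int)) 0 ::
      pvDecodeB rest (PySem.Int.floordiv j (pos.length : Int))

-- B's 'while True: … ; if k >= total or len(out) >= cap: break'
def pvLoopB (pls : List (List Int)) (total cap : Int) (k : Int) (out : List (List Int)) : List (List Int) :=
  let combo := (pvDecodeB pls.reverse k).reverse
  let out' := out ++ [combo]
  let k' := k + 1
  if total ≤ k' ∨ cap ≤ (out'.length : Int) then out'
  else pvLoopB pls total cap k' out'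
termination_by (total - k).toNat
decreasing_by
  rename_i h
  simp only [not_or, not_le] at h
  omega

def positions_for_target_alt (source : String) (target : String) (cap : Int) : List (List Int) :=
  match pvPosLists source.toList target.toList with
  | none => []
  | some pls => pvLoopB pls (pvTotal pls) cap 0 []

-- ===== PRECONDITION & SPEC =====
def Spec_positions_for_target (source : String) (target : String) (cap : Int) (out : List (List Int)) : Prop := out = positions_for_target_alt source target cap
instance (source : String) (target : String) (cap : Int) (out : List (List Int)) : Decidable (Spec_positions_for_target source target cap out) := by unfold Spec_positions_for_target; infer_instance

-- ===== CLAIM (what is proved, stated in full; the proofs are below) =====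
def Claim_equal_positions_for_target : Prop := ∀ (source : String) (target : String) (cap : Int), Dom_positions_for_target source target cap → Spec_positions_for_target source target cap (positions_for_target source target cap)

-- ===== LEMMAS AND PROOFS =====

-- build-then-reverse form of B's decode (the order A's product emits digits in)
def pvDecode : List (List Int) → Int → List Int
  | [], _ => []
  | l :: rest, k =>
    pvDecode rest (PySem.Int.floordiv k (l.length : Int)) ++
      [PySem.List.pyGetD l (PySem.Int.mod k (l.length : Int)) 0]

theorem pvDecodeB_reverse (rls : List (List Int)) (k : Int) :
    (pvDecodeB rls k).reverse = pvDecode rls k := by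
  induction rls generalizing k with
  | nil => rfl
  | cons l rest ih => simp [pvDecodeB, pvDecode, ih]

theorem pvTotal_foldl (pls : List (List Int)) (a : Int) :
    pls.foldl (fun t pos => t * (pos.length : Int)) a = a * ((pls.map List.length).prod : Nat) := by
  induction pls generalizing a with
  | nil => simp
  | cons l rest ih => simp [ih, mul_assoc]

theorem pvTotal_eq (pls : List (List Int)) :
    pvTotal pls = (((pls.map List.length).prod : Nat) : Int) := by
  simp [pvTotal, pvTotal_foldl]

theorem pvLoopA_eq (cap : Int) (l : List (List Int)) (acc : List (List Int)) :
    pvLoopA cap l acc = acc ++ l.take (max 1 (cap - acc.length).toNat) := by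
  induction l generalizing acc with
  | nil => simp [pvLoopA]
  | cons c rest ih =>
    simp only [pvLoopA]
    split
    · next h =>
      have h1 : max 1 (cap - (acc.length : Int)).toNat = 1 := by
        simp at h; omega
      rw [h1]
      rfl
    · next h =>
      rw [ih]
      have h2 : max 1 (cap - ((acc ++ [c]).length : Int)).toNat
          = (cap - acc.length).toNat - 1 := by
        simp at h ⊢; omega
      have h3 : max 1 (cap - acc.length).toNat = (cap - acc.length).toNat := by
        simp at h; omega
      rw [h2, h3]
      have h4 : (cap - acc.length).toNat = ((cap - acc.length).toNat - 1) + 1 := by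
        simp at h; omega
      conv_rhs => rw [h4]
      simp [List.take_succ_cons]

theorem pvProdA_snoc (ls : List (List Int)) (l : List Int) :
    pvProdA (ls ++ [l]) = (pvProdA ls).flatMap (fun t => l.map (fun x => t ++ [x])) := by
  induction ls with
  | nil =>
    simp only [List.nil_append, pvProdA, List.flatMap]
    induction l with
    | nil => rfl
    | cons x xs ihx => simp_all
  | cons a ls' ih =>
    simp only [List.cons_append, pvProdA, ih]
    simp only [List.flatMap_assoc, List.flatMap_map, List.map_flatMap, List.map_map]
    rfl

theorem pvRange_mul (n m : Nat) :
    List.range (n * m) = (List.range n).flatMap (fun q => (List.range m).map (fun r => q * m + r)) := by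
  induction n with
  | zero => simp
  | succ n ih =>
    have : (n + 1) * m = n * m + m := by ring
    rw [this, List.range_add, List.range_succ, ih]
    simp

theorem pvDecode_cons (l : List Int) (rls : List (List Int)) (q r : Nat)
    (hr : r < l.length) :
    pvDecode (l :: rls) ((q * l.length + r : Nat) : Int)
      = pvDecode rls (q : Int) ++ [l[r]] := by
  have hmod : PySem.Int.mod ((q * l.length + r : Nat) : Int) (l.length : Int) = ((r : Nat) : Int) := by
    rw [PySem.Int.mod_natCast]
    congr 1
    rw [Nat.add_comm, Nat.add_mul_mod_self_right]
    exact Nat.mod_eq_of_lt hr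
  have hdiv : PySem.Int.floordiv ((q * l.length + r : Nat) : Int) (l.length : Int) = ((q : Nat) : Int) := by
    rw [PySem.Int.floordiv_natCast]
    congr 1
    rw [Nat.add_comm, Nat.add_mul_div_right _ _ (by omega : 0 < l.length), Nat.div_eq_of_lt hr]
    omega
  simp only [pvDecode, hmod, hdiv]
  congr 1
  simp [PySem.List.pyGetD_natCast, List.getD_eq_getElem?_getD, hr]

theorem pvProdA_decode (pls : List (List Int)) (hne : ∀ l ∈ pls, l ≠ []) :
    pvProdA pls = (List.range (pls.map List.length).prod).map
      (fun j : Nat => pvDecode pls.reverse (j : Int)) := by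
  induction pls using List.reverseRecOn with
  | nil => simp [pvProdA, pvDecode]
  | append_singleton ls l ih =>
    have hl : l ≠ [] := hne l (by simp)
    have hls : ∀ x ∈ ls, x ≠ [] := fun x hx => hne x (by simp [hx])
    have hm : 0 < l.length := List.length_pos_iff.mpr hl
    rw [pvProdA_snoc, ih hls]
    have hN : ((ls ++ [l]).map List.length).prod = (ls.map List.length).prod * l.length := by
      simp
    rw [hN, pvRange_mul]
    rw [List.flatMap_map, List.map_flatMap]
    apply List.flatMap_congr
    intro q _
    rw [List.map_map]
    have : l.map (fun x => pvDecode ls.reverse (q : Int) ++ [x])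
        = (List.range l.length).map (fun r => pvDecode ls.reverse (q : Int) ++ [l.getD r 0]) := by
      apply List.ext_getElem
      · simp
      · intro i h1 h2
        have h1' : i < l.length := by simpa using h1
        simp [List.getD_eq_getElem?_getD, List.getElem?_eq_getElem h1']
    rw [this]
    apply List.map_congr_left
    intro r hr
    have hr' : r < l.length := by simpa using hr
    simp only [Function.comp, List.reverse_append, List.reverse_singleton, List.singleton_append]
    rw [pvDecode_cons l ls.reverse q r hr']
    simp [List.getD_eq_getElem?_getD, hr']

theorem pvPosLists_ne_nil (source : List Char) (target : List Char) (pls : List (List Int))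
    (h : pvPosLists source target = some pls) : ∀ l ∈ pls, l ≠ [] := by
  induction target generalizing pls with
  | nil => simp [pvPosLists] at h; subst h; simp
  | cons ch rest ih =>
    simp only [pvPosLists] at h
    split at h
    · simp at h
    · next hpos =>
      rcases Option.map_eq_some_iff.mp h with ⟨tl, htl, rfl⟩
      intro l hl
      rcases List.mem_cons.mp hl with rfl | hl
      · exact hpos
      · exact ih tl htl l hl

-- characterisation of B's while loop: it emits the decodings of k, k+1, … and stops
-- after max 1 (min (N-k) (cap-|out|)) iterations
theorem pvLoopB_eq (pls : List (List Int)) (N : Nat) (cap : Int) (n : Nat) :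
    ∀ (k : Nat) (out : List (List Int)), k < N → N - k ≤ n →
    pvLoopB pls (N : Int) cap (k : Int) out
      = out ++ (List.range' k (max 1 (min (N - k) (cap - out.length).toNat))).map
          (fun j : Nat => (pvDecodeB pls.reverse (j : Int)).reverse) := by
  induction n with
  | zero => intro k out hk hn; omega
  | succ n ih =>
    intro k out hk hn
    rw [pvLoopB]
    split
    · next h =>
      have hs : max 1 (min (N - k) (cap - out.length).toNat) = 1 := by
        rcases h with h | h
        · have : N ≤ k + 1 := by exact_mod_cast h
          omega
        · have : cap ≤ (out.length : Int) + 1 := by simpa using h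
          omega
      rw [hs]
      simp [List.range']
    · next h =>
      simp only [not_or, not_le] at h
      obtain ⟨h1, h2⟩ := h
      have h1' : k + 1 < N := by exact_mod_cast h1
      have h2' : (out.length : Int) + 1 < cap := by simpa using h2
      have hkk : ((k : Int) + 1) = ((k + 1 : Nat) : Int) := by push_cast; ring
      rw [hkk, ih (k + 1) (out ++ [(pvDecodeB pls.reverse (k : Int)).reverse]) h1' (by omega)]
      have hs : max 1 (min (N - k) (cap - out.length).toNat)
          = (max 1 (min (N - (k + 1)) (cap - ((out ++ [(pvDecodeB pls.reverse (k : Int)).reverse]).length : Int)).toNat)) + 1 := by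
        simp only [List.length_append, List.length_cons, List.length_nil]
        omega
      rw [hs, List.range'_succ]
      simp

-- ===== VERDICT (by name: the statement is the Claim_ definition above) =====
theorem positions_for_target_spec : Claim_equal_positions_for_target := by
  intro source target cap _
  unfold Spec_positions_for_target positions_for_target positions_for_target_alt
  cases h : pvPosLists source.toList target.toList with
  | none => rfl
  | some pls =>
    simp only []
    have hne := pvPosLists_ne_nil _ _ _ h
    set N : Nat := (pls.map List.length).prod with hN
    have hNpos : 0 < N := by
      rw [hN]
      apply List.prod_pos
      intro x hx
      rcases List.mem_map.mp hx with ⟨l, hl, rfl⟩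
      exact List.length_pos_iff.mpr (hne l hl)
    rw [pvLoopA_eq, pvProdA_decode pls hne, ← hN]
    rw [pvTotal_eq, ← hN]
    have h0 : ((0 : Nat) : Int) = (0 : Int) := rfl
    rw [← h0, pvLoopB_eq pls N cap N 0 [] hNpos (by omega)]
    simp only [List.nil_append, List.length_nil, Nat.cast_zero, sub_zero, Nat.sub_zero]
    rw [← List.map_take, List.take_range]
    have hmm : min (max 1 cap.toNat) N = max 1 (min N cap.toNat) := by omega
    rw [hmm, List.range_eq_range']
    apply List.map_congr_left
    intro j _
    rw [pvDecodeB_reverse]
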